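-- pv_equiv track=rewrite | github.com/ilnar-geekbrains/Test_11_18 | romturino_solutions.py | arr_mul
-- ===== SOURCE A (Python) =====
-- def arr_mul(arr1, arr2):
--     new_arr = []
--     polinom_sum = 0
--     for i in range(len(arr1)):
--         for j in range(len(arr2)):
--             if i == j:
--                 if polinom_sum:
--                     new_arr.append(polinom_sum)
--                 new_arr.append(arr1[i] * arr2[j])
--             else:
--                 polinom_sum += arr1[i] * arr2[j]
--     return new_arr
-- ===== SOURCE B (Python) =====
-- def arr_mul(arr1, arr2):
--     total = sum(arr2)
--     out = []
--     run = 0   # cumulative off-diagonal product sum at the start of row i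
--     pre = 0   # sum of arr2[:i]
--     for i in range(min(len(arr1), len(arr2))):
--         cum = run + arr1[i] * pre
--         if cum:
--             out.append(cum)
--         out.append(arr1[i] * arr2[i])
--         run += arr1[i] * (total - arr2[i])
--         pre += arr2[i]
--     return out
-- ===== Notes on version B (the rewrite author's own statement) =====
-- stated objective: faster
-- what changed: Replaces the nested i,j loops (every off-diagonal product summed individually) by a single pass over the diagonal that maintains a running prefix sum of arr2 and the cumulative off-diagonal sum via run += arr1[i]*(total - arr2[i]), using total = sum(arr2) computed once.
import Mathlib
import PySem

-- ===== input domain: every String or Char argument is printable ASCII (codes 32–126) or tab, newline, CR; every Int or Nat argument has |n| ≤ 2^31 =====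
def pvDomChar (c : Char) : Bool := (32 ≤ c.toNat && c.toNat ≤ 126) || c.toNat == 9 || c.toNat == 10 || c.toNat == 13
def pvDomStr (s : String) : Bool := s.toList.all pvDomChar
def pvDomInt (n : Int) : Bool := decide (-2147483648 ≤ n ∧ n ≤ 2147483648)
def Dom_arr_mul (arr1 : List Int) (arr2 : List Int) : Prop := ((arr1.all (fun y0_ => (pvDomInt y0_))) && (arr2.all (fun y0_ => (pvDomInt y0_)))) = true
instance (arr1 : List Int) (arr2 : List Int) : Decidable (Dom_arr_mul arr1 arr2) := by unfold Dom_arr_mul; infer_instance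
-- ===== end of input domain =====

-- B replaces A's nested O(n*m) loops by one O(n+m) pass using a prefix sum of arr2 and a running cumulative off-diagonal sum (objective: faster).

-- ===== PORT A =====
def arr_mul (arr1 : List Int) (arr2 : List Int) : List Int :=
  ((PySem.List.pyRange 0 (arr1.length : Int) 1).foldl (fun st i =>
      (PySem.List.pyRange 0 (arr2.length : Int) 1).foldl (fun st j =>
        if i == j then
          let st := if st.2 != 0 then (st.1 ++ [st.2], st.2) else st
          (st.1 ++ [PySem.List.pyGetD arr1 i 0 * PySem.List.pyGetD arr2 j 0], st.2)
        else
          (st.1, st.2 + PySem.List.pyGetD arr1 i 0 * PySem.List.pyGetD arr2 j 0)) st)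
    (([] : List Int), (0 : Int))).1

-- ===== PORT B =====
def arr_mul_alt (arr1 : List Int) (arr2 : List Int) : List Int :=
  let total := arr2.sum
  ((PySem.List.pyRange 0 ((min arr1.length arr2.length : Nat) : Int) 1).foldl (fun st i =>
      let a := PySem.List.pyGetD arr1 i 0
      let b := PySem.List.pyGetD arr2 i 0
      let cum := st.2.1 + a * st.2.2
      let out := if cum != 0 then st.1 ++ [cum] else st.1
      (out ++ [a * b], st.2.1 + a * (total - b), st.2.2 + b))
    (([] : List Int), (0 : Int), (0 : Int))).1

-- ===== PRECONDITION & SPEC =====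
def Spec_arr_mul (arr1 : List Int) (arr2 : List Int) (out : List Int) : Prop := out = arr_mul_alt arr1 arr2
instance (arr1 : List Int) (arr2 : List Int) (out : List Int) : Decidable (Spec_arr_mul arr1 arr2 out) := by unfold Spec_arr_mul; infer_instance

-- ===== CLAIM (what is proved, stated in full; the proofs are below) =====
def Claim_equal_arr_mul : Prop := ∀ (arr1 : List Int) (arr2 : List Int), Dom_arr_mul arr1 arr2 → Spec_arr_mul arr1 arr2 (arr_mul arr1 arr2)

-- ===== LEMMAS AND PROOFS =====

-- A's inner-loop body, named for the proofs
def AinnerF (arr1 arr2 : List Int) (i : Int) (st : List Int × Int) (j : Int) : List Int × Int :=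
  if i == j then
    let st := if st.2 != 0 then (st.1 ++ [st.2], st.2) else st
    (st.1 ++ [PySem.List.pyGetD arr1 i 0 * PySem.List.pyGetD arr2 j 0], st.2)
  else
    (st.1, st.2 + PySem.List.pyGetD arr1 i 0 * PySem.List.pyGetD arr2 j 0)

def Arow (arr1 arr2 : List Int) (st : List Int × Int) (i : Int) : List Int × Int :=
  (PySem.List.pyRange 0 (arr2.length : Int) 1).foldl (AinnerF arr1 arr2 i) st

-- B's loop body, named for the proofs
def Bstep (arr1 arr2 : List Int) (st : List Int × Int × Int) (i : Int) : List Int × Int × Int :=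
  let a := PySem.List.pyGetD arr1 i 0
  let b := PySem.List.pyGetD arr2 i 0
  let cum := st.2.1 + a * st.2.2
  let out := if cum != 0 then st.1 ++ [cum] else st.1
  (out ++ [a * b], st.2.1 + a * (arr2.sum - b), st.2.2 + b)

theorem arr_mul_eq_rows (arr1 arr2 : List Int) :
    arr_mul arr1 arr2 =
      ((PySem.List.pyRange 0 (arr1.length : Int) 1).foldl (Arow arr1 arr2)
        (([] : List Int), (0 : Int))).1 := rfl

theorem arr_mul_alt_eq_steps (arr1 arr2 : List Int) :
    arr_mul_alt arr1 arr2 =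
      ((PySem.List.pyRange 0 ((min arr1.length arr2.length : Nat) : Int) 1).foldl (Bstep arr1 arr2)
        (([] : List Int), (0 : Int), (0 : Int))).1 := rfl

-- off-diagonal segment: when i is not in the range processed, only the sum changes
theorem foldl_AinnerF_not_mem (arr1 arr2 : List Int) (i : Int) (L : List Int) (hi : i ∉ L) :
    ∀ st : List Int × Int,
      L.foldl (AinnerF arr1 arr2 i) st =
        (st.1, st.2 + (L.map (fun j => PySem.List.pyGetD arr1 i 0 * PySem.List.pyGetD arr2 j 0)).sum) := by
  induction L with
  | nil => intro st; simp
  | cons j t ih =>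
      intro st
      have hij : i ≠ j := by intro h; exact hi (h ▸ List.mem_cons_self ..)
      have hit : i ∉ t := fun h => hi (List.mem_cons_of_mem _ h)
      simp only [List.foldl_cons, AinnerF, beq_iff_eq, if_neg hij, ih hit, List.map_cons,
        List.sum_cons]
      ring_nf

theorem sum_seg_take (arr2 : List Int) (i : Nat) (hi : i ≤ arr2.length) :
    ((PySem.List.pyRange 0 (i : Int) 1).map (fun j => PySem.List.pyGetD arr2 j 0)).sum =
      (arr2.take i).sum := by
  induction i with
  | zero => simp
  | succ k ih =>
      have hk : k ≤ arr2.length := Nat.le_of_succ_le hi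
      have hlt : k < arr2.length := hi
      have : PySem.List.pyRange 0 ((k+1 : Nat) : Int) 1 =
          PySem.List.pyRange 0 (k : Int) 1 ++ [(k : Int)] := by
        have := PySem.List.pyRange_one_succ_right (a := 0) (b := (k : Int)) (by positivity)
        simpa [Int.natCast_succ] using this
      rw [this]
      simp only [List.map_append, List.sum_append, ih hk, List.map_cons, List.map_nil,
        List.sum_cons, List.sum_nil]
      have hget : PySem.List.pyGetD arr2 ((k : Nat) : Int) 0 = arr2[k] := by
        rw [PySem.List.pyGetD_natCast]; exact List.getD_eq_getElem _ _ hlt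
      have htake : (arr2.take (k+1)).sum = (arr2.take k).sum + arr2[k] := by
        rw [List.take_add_one, List.sum_append, List.getElem?_eq_getElem hlt]
        simp
      omega

theorem sum_seg_drop (arr2 : List Int) (a : Nat) :
    ((PySem.List.pyRange (a : Int) (arr2.length : Int) 1).map (fun j => PySem.List.pyGetD arr2 j 0)).sum =
      (arr2.drop a).sum := by
  rw [PySem.List.map_pyGetD_pyRange' arr2 0 (a := (a : Int)) (by positivity)]
  simp

-- the row lemma: one full inner loop of A, for a diagonal row i < len arr2
theorem Arow_eq (arr1 arr2 : List Int) (i : Nat) (hi : i < arr2.length) (st : List Int × Int) :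
    Arow arr1 arr2 st (i : Int) =
      (st.1 ++
        (if st.2 + PySem.List.pyGetD arr1 (i : Int) 0 * (arr2.take i).sum ≠ 0 then
          [st.2 + PySem.List.pyGetD arr1 (i : Int) 0 * (arr2.take i).sum] else []) ++
        [PySem.List.pyGetD arr1 (i : Int) 0 * PySem.List.pyGetD arr2 (i : Int) 0],
       st.2 + PySem.List.pyGetD arr1 (i : Int) 0 * (arr2.sum - PySem.List.pyGetD arr2 (i : Int) 0)) := by
  have h0i : (0 : Int) ≤ (i : Int) := by positivity
  have him : (i : Int) < (arr2.length : Int) := by exact_mod_cast hi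
  have hsplit : PySem.List.pyRange 0 (arr2.length : Int) 1 =
      PySem.List.pyRange 0 (i : Int) 1 ++ ((i : Int) :: PySem.List.pyRange ((i : Int) + 1) (arr2.length : Int) 1) := by
    rw [PySem.List.pyRange_one_append 0 (i : Int) (arr2.length : Int) h0i (le_of_lt him),
        PySem.List.pyRange_one_cons him]
  have hnm1 : (i : Int) ∉ PySem.List.pyRange 0 (i : Int) 1 := by
    intro h; rw [PySem.List.mem_pyRange_one] at h; omega
  have hnm2 : (i : Int) ∉ PySem.List.pyRange ((i : Int) + 1) (arr2.length : Int) 1 := by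
    intro h; rw [PySem.List.mem_pyRange_one] at h; omega
  unfold Arow
  rw [hsplit, List.foldl_append, List.foldl_cons,
      foldl_AinnerF_not_mem arr1 arr2 _ _ hnm1 st]
  set a := PySem.List.pyGetD arr1 (i : Int) 0 with ha
  set C := st.2 + a * (arr2.take i).sum with hC
  have hmul : ((PySem.List.pyRange 0 (i : Int) 1).map
      (fun j => a * PySem.List.pyGetD arr2 j 0)).sum = a * (arr2.take i).sum := by
    rw [← sum_seg_take arr2 i (le_of_lt hi), ← List.sum_map_mul_left]
  have hdiag : AinnerF arr1 arr2 (i : Int)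
      (st.1, st.2 + ((PySem.List.pyRange 0 (i : Int) 1).map
        (fun j => a * PySem.List.pyGetD arr2 j 0)).sum) (i : Int) =
      (st.1 ++ (if C ≠ 0 then [C] else []) ++ [a * PySem.List.pyGetD arr2 (i : Int) 0], C) := by
    rw [hmul, ← hC]
    rcases eq_or_ne C 0 with h | h <;> simp [AinnerF, h, ha, List.append_assoc]
  rw [hdiag, foldl_AinnerF_not_mem arr1 arr2 _ _ hnm2]
  have hmul2 : ((PySem.List.pyRange ((i : Int) + 1) (arr2.length : Int) 1).map
      (fun j => a * PySem.List.pyGetD arr2 j 0)).sum = a * (arr2.drop (i+1)).sum := by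
    have hcast : ((i : Int) + 1) = ((i + 1 : Nat) : Int) := by push_cast; ring
    rw [hcast, ← sum_seg_drop arr2 (i+1), ← List.sum_map_mul_left]
  rw [hmul2]
  have hsum : (arr2.take i).sum + (arr2.drop (i+1)).sum =
      arr2.sum - PySem.List.pyGetD arr2 (i : Int) 0 := by
    have hb : PySem.List.pyGetD arr2 ((i : Nat) : Int) 0 = arr2[i] := by
      rw [PySem.List.pyGetD_natCast]; exact List.getD_eq_getElem _ _ hi
    have hdecomp : arr2.sum = (arr2.take i).sum + (arr2[i] + (arr2.drop (i+1)).sum) := by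
      conv_lhs => rw [← List.take_append_drop i arr2]
      rw [List.sum_append, List.drop_eq_getElem_cons hi, List.sum_cons]
    rw [hb]; omega
  refine Prod.ext rfl ?_
  simp only [hC]
  linear_combination a * hsum

-- B's step matches A's row on synchronized states
theorem Bstep_eq (arr1 arr2 : List Int) (i : Nat) (hi : i < arr2.length)
    (out : List Int) (s : Int) :
    Bstep arr1 arr2 (out, s, (arr2.take i).sum) (i : Int) =
      (out ++
        (if s + PySem.List.pyGetD arr1 (i : Int) 0 * (arr2.take i).sum ≠ 0 then
          [s + PySem.List.pyGetD arr1 (i : Int) 0 * (arr2.take i).sum] else []) ++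
        [PySem.List.pyGetD arr1 (i : Int) 0 * PySem.List.pyGetD arr2 (i : Int) 0],
       s + PySem.List.pyGetD arr1 (i : Int) 0 * (arr2.sum - PySem.List.pyGetD arr2 (i : Int) 0),
       (arr2.take (i+1)).sum) := by
  have hget : PySem.List.pyGetD arr2 ((i : Nat) : Int) 0 = arr2[i] := by
    rw [PySem.List.pyGetD_natCast]; exact List.getD_eq_getElem _ _ hi
  have htake : (arr2.take (i+1)).sum = (arr2.take i).sum + arr2[i] := by
    rw [List.take_add_one, List.sum_append, List.getElem?_eq_getElem hi]
    simp
  unfold Bstep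
  set a := PySem.List.pyGetD arr1 (i : Int) 0 with ha
  rcases eq_or_ne (s + a * (arr2.take i).sum) 0 with h | h
  · simp only [h, bne_self_eq_false, Bool.false_eq_true, if_false, ne_eq, not_true_eq_false,
      hget, htake, List.append_assoc]
    simp
  · simp only [ne_eq, h, not_false_eq_true, bne_iff_ne, if_pos, hget, htake, List.append_assoc]

-- common-prefix induction: both loops produce the same output over rows i..k-1
theorem prefix_eq (arr1 arr2 : List Int) (k : Nat) (hk : k ≤ arr2.length) :
    ∀ t i, i + t = k → ∀ (out : List Int) (s : Int),
      ((PySem.List.pyRange (i : Int) (k : Int) 1).foldl (Arow arr1 arr2) (out, s)).1 =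
      ((PySem.List.pyRange (i : Int) (k : Int) 1).foldl (Bstep arr1 arr2)
        (out, s, (arr2.take i).sum)).1 := by
  intro t
  induction t with
  | zero =>
      intro i hik out s
      have : (k : Int) ≤ (i : Int) := by omega
      rw [PySem.List.pyRange_one_eq_nil this]
      rfl
  | succ t ih =>
      intro i hik out s
      have hlt : (i : Int) < (k : Int) := by exact_mod_cast (by omega : i < k)
      have hil : i < arr2.length := by omega
      rw [PySem.List.pyRange_one_cons hlt, List.foldl_cons, List.foldl_cons,
          Arow_eq arr1 arr2 i hil, Bstep_eq arr1 arr2 i hil]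
      have : ((i : Int) + 1) = ((i + 1 : Nat) : Int) := by push_cast; ring
      rw [this]
      exact ih (i+1) (by omega) _ _

-- tail rows (i ≥ len arr2) never touch the output list
theorem tail_fixes_out (arr1 arr2 : List Int) (L : List Int)
    (hL : ∀ i ∈ L, (arr2.length : Int) ≤ i) :
    ∀ st : List Int × Int, (L.foldl (Arow arr1 arr2) st).1 = st.1 := by
  induction L with
  | nil => intro st; rfl
  | cons i t ih =>
      intro st
      have hi : (arr2.length : Int) ≤ i := hL i (List.mem_cons_self ..)
      have hnm : i ∉ PySem.List.pyRange 0 (arr2.length : Int) 1 := by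
        intro h; rw [PySem.List.mem_pyRange_one] at h; omega
      rw [List.foldl_cons]
      rw [show Arow arr1 arr2 st i =
        (st.1, st.2 + ((PySem.List.pyRange 0 (arr2.length : Int) 1).map
          (fun j => PySem.List.pyGetD arr1 i 0 * PySem.List.pyGetD arr2 j 0)).sum) from
        foldl_AinnerF_not_mem arr1 arr2 i _ hnm st]
      exact ih (fun j hj => hL j (List.mem_cons_of_mem _ hj)) _

-- ===== VERDICT (by name: the statement is the Claim_ definition above) =====
theorem arr_mul_spec : Claim_equal_arr_mul := by
  intro arr1 arr2 _
  unfold Spec_arr_mul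
  rw [arr_mul_eq_rows, arr_mul_alt_eq_steps]
  set n := arr1.length with hn
  set m := arr2.length with hm
  set k := min n m with hkdef
  have hk2 : k ≤ m := Nat.min_le_right n m
  have hkn : k ≤ n := Nat.min_le_left n m
  have hsplit : PySem.List.pyRange 0 (n : Int) 1 =
      PySem.List.pyRange 0 (k : Int) 1 ++ PySem.List.pyRange (k : Int) (n : Int) 1 :=
    PySem.List.pyRange_one_append 0 (k : Int) (n : Int) (by positivity)
      (by exact_mod_cast hkn)
  rw [hsplit, List.foldl_append]
  rw [tail_fixes_out arr1 arr2 _ ?htail]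
  case htail =>
    intro i hi
    rw [PySem.List.mem_pyRange_one] at hi
    have hk' : (k : Int) = min (n : Int) (m : Int) := by rw [hkdef]; push_cast; rfl
    omega
  have h0 : ((0 : Nat) : Int) = (0 : Int) := rfl
  have := prefix_eq arr1 arr2 k hk2 k 0 (by omega) [] 0
  simpa using this
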